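-- pv_equiv track=rewrite | github.com/ag502/algorithm | Problem/Prgms_게임아이템/main.py | solution
-- ===== SOURCE A (Python) =====
-- from heapq import heapify, heappop, heappush
-- from collections import deque
--
-- def solution(healths, items):
--     healths.sort()
--     items = deque(sorted([(item[1], item[0], idx + 1)
--                           for idx, item in enumerate(items)]))
--     heap = []
--     answer = []
--
--     for health in healths:
--         while items:
--             debuff, buff, idx = items[0]
--             if health - debuff < 100:
--                 break
--             items.popleft()
--             heappush(heap, (-buff, idx))
--         if heap:
--             _, index = heappop(heap)
--             answer.append(index)
--
--     return sorted(answer)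
-- ===== SOURCE B (Python) =====
-- def solution(healths, items):
--     healths.sort()
--     order = sorted([(item[1], item[0], idx + 1)
--                     for idx, item in enumerate(items)])
--     available = []
--     answer = []
--     p = 0
--     for health in healths:
--         while p < len(order) and health - order[p][0] >= 100:
--             available.append((-order[p][1], order[p][2]))
--             p += 1
--         if available:
--             best = available[0]
--             for cand in available[1:]:
--                 if cand < best:
--                     best = cand
--             available.remove(best)
--             answer.append(best[1])
--     return sorted(answer)
-- ===== Notes on version B (the rewrite author's own statement) =====
-- stated objective: simpler
-- what changed: Replaces the heapq binary max-heap with a plain list scanned linearly for the best (-buff, idx) key, and the deque popleft consumption with an advancing index into the debuff-sorted item list.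
import Mathlib
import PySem

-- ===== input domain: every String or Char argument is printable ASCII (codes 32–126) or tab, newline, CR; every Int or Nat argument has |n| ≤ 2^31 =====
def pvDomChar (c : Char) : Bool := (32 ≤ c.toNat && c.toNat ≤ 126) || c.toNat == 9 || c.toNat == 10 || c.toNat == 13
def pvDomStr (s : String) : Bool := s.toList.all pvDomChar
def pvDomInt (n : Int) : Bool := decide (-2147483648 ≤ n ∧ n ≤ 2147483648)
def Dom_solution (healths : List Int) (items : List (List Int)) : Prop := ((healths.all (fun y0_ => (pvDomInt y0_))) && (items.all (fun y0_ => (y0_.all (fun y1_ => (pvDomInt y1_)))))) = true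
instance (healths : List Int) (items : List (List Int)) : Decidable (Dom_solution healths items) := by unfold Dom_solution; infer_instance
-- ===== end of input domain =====

-- B replaces A's heapq max-heap with a plain list scanned for its minimum key (simpler data structure, same greedy result).
-- Both A and B sort `healths` in place (a caller-visible mutation); the equivalence proved here is about the return value.


-- Python's `<` on int pairs / triples (lexicographic), as Bool
def pvLt (a b : Int × Int) : Bool :=
  decide (a.1 < b.1 ∨ (a.1 = b.1 ∧ a.2 < b.2))

def pvLt3 (a b : Int × Int × Int) : Bool :=
  decide (a.1 < b.1 ∨ (a.1 = b.1 ∧ (a.2.1 < b.2.1 ∨ (a.2.1 = b.2.1 ∧ a.2.2 < b.2.2))))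

-- shared by both ports (the identical expression occurs in both Pythons):
-- sorted([(item[1], item[0], idx + 1) for idx, item in enumerate(items)]).
-- The sort is the stable insertion sort `foldl insertBy` with the strict lexicographic
-- Python tuple `<` pvLt3 — exact for Python's `sorted` on int triples.
-- `item[1]`/`item[0]` raise IndexError on sublists shorter than 2 (excluded by Pre_); `.getD 0` is never reached there.
def pvOrder (items : List (List Int)) : List (Int × Int × Int) :=
  ((PySem.List.enumerate items).map
      (fun e => (((PySem.List.pyGet? e.2 1).getD 0), ((PySem.List.pyGet? e.2 0).getD 0), e.1 + 1))).foldl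
    (fun acc x => PySem.List.insertBy pvLt3 x acc) []

-- ===== PORT A =====
-- hand port of CPython heapq._siftdown (bubble-up), step for step
def siftdown (heap : List (Int × Int)) (startpos pos : Nat) (newitem : Int × Int) : List (Int × Int) :=
  if _h : startpos < pos then
    let parentpos := (pos - 1) / 2
    let parent := heap.getD parentpos (0, 0)
    if pvLt newitem parent then
      siftdown (heap.set pos parent) startpos parentpos newitem
    else heap.set pos newitem
  else heap.set pos newitem
termination_by pos
decreasing_by omega

-- hand port of CPython heapq._siftup (sink to a leaf, then bubble-up), step for step
def siftup (heap : List (Int × Int)) (startpos pos : Nat) (newitem : Int × Int) : List (Int × Int) :=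
  if h : 2 * pos + 1 < heap.length then
    let childpos := 2 * pos + 1
    let childpos :=
      if childpos + 1 < heap.length ∧
          pvLt (heap.getD childpos (0, 0)) (heap.getD (childpos + 1) (0, 0)) = false then
        childpos + 1
      else childpos
    siftup (heap.set pos (heap.getD childpos (0, 0))) startpos childpos newitem
  else siftdown (heap.set pos newitem) startpos pos newitem
termination_by heap.length - pos
decreasing_by simp only [List.length_set]; split <;> omega

-- heapq.heappush: append, then bubble the new item up
def heappush (heap : List (Int × Int)) (item : Int × Int) : List (Int × Int) :=
  siftdown (heap ++ [item]) 0 heap.length item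

-- heapq.heappop (A only calls it on a nonempty heap): pop the last element,
-- move it to the root, sink; returns (popped min, new heap)
def heappop (heap : List (Int × Int)) : (Int × Int) × List (Int × Int) :=
  let lastelt := heap.getLastD (0, 0)
  let rest := heap.dropLast
  if rest.isEmpty then (lastelt, rest)
  else (rest.getD 0 (0, 0), siftup (rest.set 0 lastelt) 0 0 lastelt)

-- the inner `while items: … popleft … heappush …`
def pushItems (health : Int) (its : List (Int × Int × Int)) (heap : List (Int × Int)) :
    List (Int × Int × Int) × List (Int × Int) :=
  match its with
  | [] => ([], heap)
  | t :: rest =>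
    if health - t.1 < 100 then (t :: rest, heap)
    else pushItems health rest (heappush heap (-t.2.1, t.2.2))

-- the `for health in healths` loop
def aLoop (healths : List Int) (its : List (Int × Int × Int)) (heap : List (Int × Int))
    (answer : List Int) : List Int :=
  match healths with
  | [] => answer
  | h :: hs =>
    let s := pushItems h its heap
    if s.2.isEmpty then aLoop hs s.1 s.2 answer
    else aLoop hs s.1 (heappop s.2).2 (answer ++ [(heappop s.2).1.2])

def solution (healths : List Int) (items : List (List Int)) : List Int :=
  PySem.List.sorted
    (aLoop (PySem.List.sorted healths (fun x => x) false) (pvOrder items) [] [])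
    (fun x => x) false

-- ===== PORT B =====
-- the `while p < len(order) and health - order[p][0] >= 100` pointer loop
def bFill (health : Int) (order : List (Int × Int × Int)) (p : Nat) (avail : List (Int × Int)) :
    Nat × List (Int × Int) :=
  if _h : p < order.length ∧ 100 ≤ health - (order.getD p (0, 0, 0)).1 then
    bFill health order (p + 1)
      (avail ++ [(-(order.getD p (0, 0, 0)).2.1, (order.getD p (0, 0, 0)).2.2)])
  else (p, avail)
termination_by order.length - p
decreasing_by omega

-- `best = available[0]; for cand in available[1:]: if cand < best: best = cand`
def bestOf (avail : List (Int × Int)) : Int × Int :=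
  (avail.drop 1).foldl (fun b c => if pvLt c b then c else b) (avail.getD 0 (0, 0))

-- the `for health in healths` loop of B (available.remove(best) never raises: best ∈ available)
def bLoop (healths : List Int) (order : List (Int × Int × Int)) (p : Nat)
    (avail : List (Int × Int)) (answer : List Int) : List Int :=
  match healths with
  | [] => answer
  | h :: hs =>
    let s := bFill h order p avail
    if s.2.isEmpty then bLoop hs order s.1 s.2 answer
    else
      let best := bestOf s.2
      bLoop hs order s.1 ((PySem.List.remove? s.2 best).getD []) (answer ++ [best.2])

def solution_alt (healths : List Int) (items : List (List Int)) : List Int :=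
  PySem.List.sorted
    (bLoop (PySem.List.sorted healths (fun x => x) false) (pvOrder items) 0 [] [])
    (fun x => x) false

-- ===== PRECONDITION & SPEC =====
-- A evaluates item[1] and item[0] on every element of items: IndexError (a raise) on any sublist
-- shorter than 2; exactly those inputs are excluded.
def Pre_solution (healths : List Int) (items : List (List Int)) : Prop :=
  ∀ it ∈ items, 2 ≤ it.length
instance (healths : List Int) (items : List (List Int)) : Decidable (Pre_solution healths items) := by
  unfold Pre_solution; infer_instance
def pvWitness_solution : List Int × List (List Int) := ([120, 100, 150], [[10, 5], [3, 30], [10, 7]])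

def Spec_solution (healths : List Int) (items : List (List Int)) (out : List Int) : Prop := out = solution_alt healths items
instance (healths : List Int) (items : List (List Int)) (out : List Int) : Decidable (Spec_solution healths items out) := by unfold Spec_solution; infer_instance

-- ===== CLAIM (what is proved, stated in full; the proofs are below) =====
def Claim_equal_solution : Prop := ∀ (healths : List Int) (items : List (List Int)), Dom_solution healths items → Pre_solution healths items → Spec_solution healths items (solution healths items)

-- ===== LEMMAS AND PROOFS =====

-- order lemmas for pvLt (strict lexicographic order on Int × Int)
theorem pvLt_irrefl (a : Int × Int) : pvLt a a = false := by
  obtain ⟨a1, a2⟩ := a; simp [pvLt]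

theorem pvLt_asymm {a b : Int × Int} (h : pvLt a b = true) : pvLt b a = false := by
  obtain ⟨a1, a2⟩ := a; obtain ⟨b1, b2⟩ := b
  simp only [pvLt, decide_eq_true_eq, decide_eq_false_iff_not] at *; omega

theorem pvLt_antisymm {a b : Int × Int} (h1 : pvLt a b = false) (h2 : pvLt b a = false) : a = b := by
  obtain ⟨a1, a2⟩ := a; obtain ⟨b1, b2⟩ := b
  simp only [pvLt, decide_eq_false_iff_not] at *
  simp only [Prod.mk.injEq]; omega

theorem pvLe_trans {a b c : Int × Int} (h1 : pvLt b a = false) (h2 : pvLt c b = false) :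
    pvLt c a = false := by
  obtain ⟨a1, a2⟩ := a; obtain ⟨b1, b2⟩ := b; obtain ⟨c1, c2⟩ := c
  simp only [pvLt, decide_eq_false_iff_not] at *; omega

theorem pvLt_le_trans {a b c : Int × Int} (h1 : pvLt a b = true) (h2 : pvLt c b = false) :
    pvLt c a = false := by
  obtain ⟨a1, a2⟩ := a; obtain ⟨b1, b2⟩ := b; obtain ⟨c1, c2⟩ := c
  simp only [pvLt, decide_eq_true_eq, decide_eq_false_iff_not] at *; omega

-- getD through List.set
theorem getD_set_ne (l : List (Int × Int)) (i j : Nat) (v : Int × Int) (hne : i ≠ j) :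
    (l.set i v).getD j (0, 0) = l.getD j (0, 0) := by
  rcases Nat.lt_or_ge j l.length with hj | hj
  · rw [List.getD_eq_getElem _ _ (by simpa using hj), List.getD_eq_getElem _ _ hj,
      List.getElem_set]
    simp [hne]
  · rw [List.getD_eq_getElem?_getD, List.getD_eq_getElem?_getD,
      List.getElem?_eq_none (by simpa using hj), List.getElem?_eq_none hj]

theorem getD_set_self (l : List (Int × Int)) (i : Nat) (v : Int × Int) (hi : i < l.length) :
    (l.set i v).getD i (0, 0) = v := by
  rw [List.getD_eq_getElem _ _ (by simpa using hi), List.getElem_set]; simp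

-- counting elements through List.set
theorem count_set (l : List (Int × Int)) (i : Nat) (v a : Int × Int) (h : i < l.length) :
    (l.set i v).count a + (if l[i] = a then 1 else 0) = l.count a + (if v = a then 1 else 0) := by
  induction l generalizing i with
  | nil => simp at h
  | cons x t ih =>
    cases i with
    | zero =>
      simp only [List.set_cons_zero, List.count_cons, List.getElem_cons_zero, beq_iff_eq]
      split_ifs <;> omega
    | succ i =>
      have h' : i < t.length := by simpa using h
      have hh := ih i h'
      simp only [List.set_cons_succ, List.count_cons, List.getElem_cons_succ, beq_iff_eq] at *
      split_ifs at * <;> omega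

-- the basic heap step (copy l[j] to slot i, write x into slot j) is a permutation of writing x at i
theorem set_copy_set_perm (heap : List (Int × Int)) (pos cp : Nat) (item : Int × Int)
    (hpos : pos < heap.length) (hcp : cp < heap.length) (hne : pos ≠ cp) :
    ((heap.set pos (heap.getD cp (0, 0))).set cp item).Perm (heap.set pos item) := by
  rw [List.perm_iff_count]; intro a
  have c1 := count_set (heap.set pos (heap.getD cp (0, 0))) cp item a (by simpa using hcp)
  have c2 := count_set heap pos (heap.getD cp (0, 0)) a hpos
  have c3 := count_set heap pos item a hpos
  have e : (heap.set pos (heap.getD cp (0, 0)))[cp]'(by simpa using hcp) = heap.getD cp (0, 0) := by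
    rw [List.getElem_set]
    simp only [hne, if_false]
    exact (List.getD_eq_getElem _ _ hcp).symm
  rw [e] at c1
  split_ifs at c1 c2 c3 <;> omega

-- permutation facts
theorem siftdown_perm (pos : Nat) (heap : List (Int × Int)) (s : Nat) (item : Int × Int)
    (h : pos < heap.length) : (siftdown heap s pos item).Perm (heap.set pos item) := by
  induction pos using Nat.strong_induction_on generalizing heap with
  | _ pos ih =>
  rw [siftdown]
  by_cases hs : s < pos
  · simp only [dif_pos hs]
    by_cases hsw : pvLt item (heap.getD ((pos - 1) / 2) (0, 0)) = true
    · rw [if_pos hsw]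
      have hpp : (pos - 1) / 2 < pos := by omega
      have hpplen : (pos - 1) / 2 < heap.length := lt_trans hpp h
      have h1 := ih _ hpp (heap.set pos (heap.getD ((pos - 1) / 2) (0, 0)))
        (by simpa using hpplen)
      exact h1.trans (set_copy_set_perm heap pos _ item h hpplen (by omega))
    · rw [if_neg hsw]
  · simp only [dif_neg hs]
    exact List.Perm.refl _

theorem siftup_perm (n : Nat) (pos : Nat) (heap : List (Int × Int)) (item : Int × Int)
    (hn : heap.length - pos = n) (h : pos < heap.length) :
    (siftup heap 0 pos item).Perm (heap.set pos item) := by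
  induction n using Nat.strong_induction_on generalizing pos heap with
  | _ n ih =>
  rw [siftup]
  by_cases hc : 2 * pos + 1 < heap.length
  · simp only [dif_pos hc]
    by_cases hb : 2 * pos + 1 + 1 < heap.length ∧
        pvLt (heap.getD (2 * pos + 1) (0, 0)) (heap.getD (2 * pos + 1 + 1) (0, 0)) = false
    · rw [if_pos hb]
      have h1 := ih (heap.length - (2 * pos + 1 + 1)) (by omega) (2 * pos + 1 + 1)
        (heap.set pos (heap.getD (2 * pos + 1 + 1) (0, 0))) (by simp) (by simpa using hb.1)
      exact h1.trans (set_copy_set_perm heap pos _ item h hb.1 (by omega))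
    · rw [if_neg hb]
      have h1 := ih (heap.length - (2 * pos + 1)) (by omega) (2 * pos + 1)
        (heap.set pos (heap.getD (2 * pos + 1) (0, 0))) (by simp) (by simpa using hc)
      exact h1.trans (set_copy_set_perm heap pos _ item h hc (by omega))
  · simp only [dif_neg hc]
    have hp := siftdown_perm pos (heap.set pos item) 0 item (by simpa using h)
    rw [List.set_set] at hp
    exact hp

theorem heappush_perm (heap : List (Int × Int)) (item : Int × Int) :
    (heappush heap item).Perm (item :: heap) := by
  unfold heappush
  refine (siftdown_perm heap.length (heap ++ [item]) 0 item (by simp)).trans ?_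
  rw [List.perm_iff_count]; intro a
  have c1 := count_set (heap ++ [item]) heap.length item a (by simp)
  have e : (heap ++ [item])[heap.length]'(by simp) = item := by simp
  rw [e] at c1
  simp only [List.count_append, List.count_cons, List.count_nil, beq_iff_eq] at *
  split_ifs at * <;> omega

theorem heappop_eq_of_nonempty (heap : List (Int × Int))
    (hemp : heap.dropLast.isEmpty = false) :
    heappop heap = (heap.dropLast.getD 0 (0, 0),
      siftup (heap.dropLast.set 0 (heap.getLastD (0, 0))) 0 0 (heap.getLastD (0, 0))) := by
  rw [heappop]
  simp [hemp]

theorem heappop_fst (heap : List (Int × Int)) (h : heap ≠ []) :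
    (heappop heap).1 = heap.getD 0 (0, 0) := by
  cases heap with
  | nil => exact absurd rfl h
  | cons x t =>
    cases t with
    | nil => simp [heappop]
    | cons y u =>
      rw [heappop_eq_of_nonempty _ rfl]
      rfl

theorem heappop_perm (heap : List (Int × Int)) (h : heap ≠ []) :
    ((heappop heap).1 :: (heappop heap).2).Perm heap := by
  cases heap with
  | nil => exact absurd rfl h
  | cons x t =>
    cases t with
    | nil => simp [heappop]
    | cons y u =>
      rw [heappop_eq_of_nonempty _ rfl]
      have hrlen : 0 < (x :: y :: u).dropLast.length := by
        rw [List.length_dropLast]; simp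
      have hlast : (x :: y :: u).getLastD (0, 0) = (x :: y :: u).getLast h := by
        rw [List.getLastD_eq_getLast?, List.getLast?_eq_some_getLast h]; rfl
      have hsplit : (x :: y :: u).dropLast ++ [(x :: y :: u).getLast h] = x :: y :: u :=
        List.dropLast_append_getLast h
      have hp1 := siftup_perm ((x :: y :: u).dropLast.set 0 ((x :: y :: u).getLastD (0, 0))).length
        0 ((x :: y :: u).dropLast.set 0 ((x :: y :: u).getLastD (0, 0)))
        ((x :: y :: u).getLastD (0, 0)) rfl (by simp [hrlen])
      rw [List.set_set] at hp1
      refine ((hp1.cons _).trans ?_)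
      rw [List.perm_iff_count]; intro a
      have c1 := count_set ((x :: y :: u).dropLast) 0 ((x :: y :: u).getLastD (0, 0)) a hrlen
      have e0 : (x :: y :: u).dropLast.getD 0 (0, 0) = (x :: y :: u).dropLast[0] :=
        List.getD_eq_getElem _ _ hrlen
      have hcnt : (x :: y :: u).count a =
          (x :: y :: u).dropLast.count a + (if (x :: y :: u).getLastD (0, 0) = a then 1 else 0) := by
        conv_lhs => rw [← hsplit]
        rw [List.count_append, hlast]
        simp only [List.count_cons, List.count_nil, beq_iff_eq]
        split_ifs <;> omega
      rw [List.count_cons, hcnt, e0]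
      simp only [beq_iff_eq]
      split_ifs at * <;> omega

-- heap invariant
def HeapInv (h : List (Int × Int)) : Prop :=
  ∀ c, c < h.length → 1 ≤ c →
    pvLt (h.getD c (0, 0)) (h.getD ((c - 1) / 2) (0, 0)) = false

theorem siftdown_valid (pos : Nat) (heap : List (Int × Int)) (item : Int × Int)
    (hlen : pos < heap.length)
    (hB : ∀ c, c < heap.length → 1 ≤ c → c ≠ pos →
      pvLt (heap.getD c (0, 0)) (heap.getD ((c - 1) / 2) (0, 0)) = false)
    (hC : ∀ c, c < heap.length → 1 ≤ c → (c - 1) / 2 = pos →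
      pvLt (heap.getD c (0, 0)) item = false ∧
      (1 ≤ pos → pvLt (heap.getD c (0, 0)) (heap.getD ((pos - 1) / 2) (0, 0)) = false)) :
    HeapInv (siftdown heap 0 pos item) := by
  induction pos using Nat.strong_induction_on generalizing heap with
  | _ pos ih =>
  rw [siftdown]
  by_cases h0 : 0 < pos
  · simp only [dif_pos h0]
    by_cases hsw : pvLt item (heap.getD ((pos - 1) / 2) (0, 0)) = true
    · rw [if_pos hsw]
      have hpp : (pos - 1) / 2 < pos := by omega
      have hpplen : (pos - 1) / 2 < heap.length := lt_trans hpp hlen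
      apply ih _ hpp
      · simpa using hpplen
      · intro c hc h1 hcne
        simp only [List.length_set] at hc
        by_cases hcpos : c = pos
        · subst hcpos
          rw [getD_set_self _ _ _ hlen, getD_set_ne _ _ _ _ (by omega)]
          exact pvLt_irrefl _
        · rw [getD_set_ne _ _ _ _ (by omega)]
          by_cases hcp2 : (c - 1) / 2 = pos
          · rw [hcp2, getD_set_self _ _ _ hlen]
            exact (hC c hc h1 hcp2).2 h0
          · rw [getD_set_ne _ _ _ _ (by omega)]
            exact hB c hc h1 hcpos
      · intro c hc h1 hcpp
        simp only [List.length_set] at hc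
        constructor
        · by_cases hcpos : c = pos
          · subst hcpos
            rw [getD_set_self _ _ _ hlen]
            exact pvLt_asymm hsw
          · rw [getD_set_ne _ _ _ _ (by omega)]
            have hb := hB c hc h1 hcpos
            rw [hcpp] at hb
            exact pvLt_le_trans hsw hb
        · intro hpp1
          rw [getD_set_ne _ _ _ _ (by omega : pos ≠ ((pos - 1) / 2 - 1) / 2)]
          have hparent_edge := hB ((pos - 1) / 2) hpplen hpp1 (by omega)
          by_cases hcpos : c = pos
          · subst hcpos
            rw [getD_set_self _ _ _ hlen]
            exact hparent_edge
          · rw [getD_set_ne _ _ _ _ (by omega)]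
            have hb := hB c hc h1 hcpos
            rw [hcpp] at hb
            exact pvLe_trans hparent_edge hb
    · rw [if_neg hsw]
      simp only [Bool.not_eq_true] at hsw
      intro c hc h1
      simp only [List.length_set] at hc
      by_cases hcpos : c = pos
      · subst hcpos
        rw [getD_set_self _ _ _ hlen, getD_set_ne _ _ _ _ (by omega)]
        exact hsw
      · rw [getD_set_ne _ _ _ _ (by omega)]
        by_cases hcp : (c - 1) / 2 = pos
        · rw [hcp, getD_set_self _ _ _ hlen]
          exact (hC c hc h1 hcp).1
        · rw [getD_set_ne _ _ _ _ (by omega)]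
          exact hB c hc h1 hcpos
  · simp only [dif_neg h0]
    have hp0 : pos = 0 := by omega
    subst hp0
    intro c hc h1
    simp only [List.length_set] at hc
    rw [getD_set_ne _ _ _ _ (by omega)]
    by_cases hpar : (c - 1) / 2 = 0
    · rw [hpar, getD_set_self _ _ _ hlen]
      exact (hC c hc h1 hpar).1
    · rw [getD_set_ne _ _ _ _ (by omega)]
      exact hB c hc h1 (by omega)

-- one descent step of _siftup keeps the "heap with a hole" invariants
theorem descend_inv (heap : List (Int × Int)) (pos cp : Nat) (hlen : pos < heap.length)
    (hcplen : cp < heap.length) (hgt : pos < cp) (hpar : (cp - 1) / 2 = pos)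
    (hB : ∀ c, c < heap.length → 1 ≤ c → c ≠ pos → (c - 1) / 2 ≠ pos →
      pvLt (heap.getD c (0, 0)) (heap.getD ((c - 1) / 2) (0, 0)) = false)
    (hD : 1 ≤ pos → ∀ c, c < heap.length → (c - 1) / 2 = pos →
      pvLt (heap.getD c (0, 0)) (heap.getD ((pos - 1) / 2) (0, 0)) = false)
    (hmin : ∀ s, s < heap.length → 1 ≤ s → (s - 1) / 2 = pos → s ≠ cp →
      pvLt (heap.getD s (0, 0)) (heap.getD cp (0, 0)) = false) :
    (∀ c, c < (heap.set pos (heap.getD cp (0, 0))).length → 1 ≤ c → c ≠ cp → (c - 1) / 2 ≠ cp →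
      pvLt ((heap.set pos (heap.getD cp (0, 0))).getD c (0, 0))
        ((heap.set pos (heap.getD cp (0, 0))).getD ((c - 1) / 2) (0, 0)) = false) ∧
    (1 ≤ cp → ∀ c, c < (heap.set pos (heap.getD cp (0, 0))).length → (c - 1) / 2 = cp →
      pvLt ((heap.set pos (heap.getD cp (0, 0))).getD c (0, 0))
        ((heap.set pos (heap.getD cp (0, 0))).getD ((cp - 1) / 2) (0, 0)) = false) := by
  constructor
  · intro c hc h1 hcne hcpne
    simp only [List.length_set] at hc
    by_cases hcpos : c = pos
    · subst hcpos
      rw [getD_set_self _ _ _ hlen, getD_set_ne _ _ _ _ (by omega)]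
      exact hD h1 cp hcplen hpar
    · rw [getD_set_ne _ _ _ _ (by omega)]
      by_cases hcp2 : (c - 1) / 2 = pos
      · rw [hcp2, getD_set_self _ _ _ hlen]
        exact hmin c hc h1 hcp2 hcne
      · rw [getD_set_ne _ _ _ _ (by omega)]
        exact hB c hc h1 hcpos hcp2
  · intro _ g hg hgpar
    simp only [List.length_set] at hg
    rw [hpar, getD_set_ne _ _ _ _ (by omega), getD_set_self _ _ _ hlen]
    have hb := hB g hg (by omega) (by omega) (by omega)
    rw [hgpar] at hb
    exact hb

theorem siftup_valid (n : Nat) (pos : Nat) (heap : List (Int × Int)) (item : Int × Int)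
    (hn : heap.length - pos = n) (hlen : pos < heap.length)
    (hB : ∀ c, c < heap.length → 1 ≤ c → c ≠ pos → (c - 1) / 2 ≠ pos →
      pvLt (heap.getD c (0, 0)) (heap.getD ((c - 1) / 2) (0, 0)) = false)
    (hD : 1 ≤ pos → ∀ c, c < heap.length → (c - 1) / 2 = pos →
      pvLt (heap.getD c (0, 0)) (heap.getD ((pos - 1) / 2) (0, 0)) = false) :
    HeapInv (siftup heap 0 pos item) := by
  induction n using Nat.strong_induction_on generalizing pos heap with
  | _ n ih =>
  rw [siftup]
  by_cases hc : 2 * pos + 1 < heap.length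
  · simp only [dif_pos hc]
    by_cases hb : 2 * pos + 1 + 1 < heap.length ∧
        pvLt (heap.getD (2 * pos + 1) (0, 0)) (heap.getD (2 * pos + 1 + 1) (0, 0)) = false
    · rw [if_pos hb]
      have hmin : ∀ s, s < heap.length → 1 ≤ s → (s - 1) / 2 = pos → s ≠ 2 * pos + 1 + 1 →
          pvLt (heap.getD s (0, 0)) (heap.getD (2 * pos + 1 + 1) (0, 0)) = false := by
        intro s hs hs1 hspar hsne
        have hseq : s = 2 * pos + 1 := by omega
        rw [hseq]
        exact hb.2
      obtain ⟨nb, nd⟩ := descend_inv heap pos (2 * pos + 1 + 1) hlen hb.1 (by omega)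
        (by omega) hB hD hmin
      exact ih (heap.length - (2 * pos + 1 + 1)) (by omega) (2 * pos + 1 + 1) _ (by simp)
        (by simpa using hb.1) nb nd
    · rw [if_neg hb]
      have hmin : ∀ s, s < heap.length → 1 ≤ s → (s - 1) / 2 = pos → s ≠ 2 * pos + 1 →
          pvLt (heap.getD s (0, 0)) (heap.getD (2 * pos + 1) (0, 0)) = false := by
        intro s hs hs1 hspar hsne
        have hseq : s = 2 * pos + 1 + 1 := by omega
        have h2 : 2 * pos + 1 + 1 < heap.length := by omega
        have hlt : pvLt (heap.getD (2 * pos + 1) (0, 0)) (heap.getD (2 * pos + 1 + 1) (0, 0)) = true := by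
          by_contra hy
          simp only [Bool.not_eq_true] at hy
          exact hb ⟨h2, hy⟩
        rw [hseq]
        exact pvLt_asymm hlt
      obtain ⟨nb, nd⟩ := descend_inv heap pos (2 * pos + 1) hlen hc (by omega)
        (by omega) hB hD hmin
      exact ih (heap.length - (2 * pos + 1)) (by omega) (2 * pos + 1) _ (by simp)
        (by simpa using hc) nb nd
  · simp only [dif_neg hc]
    apply siftdown_valid pos
    · simpa using hlen
    · intro c hcl h1 hcne
      simp only [List.length_set] at hcl
      have hpar : (c - 1) / 2 ≠ pos := by omega
      rw [getD_set_ne _ _ _ _ (by omega), getD_set_ne _ _ _ _ (by omega)]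
      exact hB c hcl h1 hcne hpar
    · intro c hcl h1 hcpar
      simp only [List.length_set] at hcl
      omega

theorem heappush_valid (heap : List (Int × Int)) (item : Int × Int) (h : HeapInv heap) :
    HeapInv (heappush heap item) := by
  apply siftdown_valid heap.length
  · simp
  · intro c hcl h1 hcne
    simp only [List.length_append, List.length_cons, List.length_nil] at hcl
    have hcl2 : c < heap.length := by omega
    rw [List.getD_append _ _ _ _ hcl2, List.getD_append _ _ _ _ (by omega)]
    exact h c hcl2 h1
  · intro c hcl h1 hcpar
    simp only [List.length_append, List.length_cons, List.length_nil] at hcl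
    omega

theorem heappop_valid (heap : List (Int × Int)) (h : HeapInv heap) :
    HeapInv (heappop heap).2 := by
  by_cases hemp : heap.dropLast.isEmpty = true
  · have hstep : (heappop heap).2 = heap.dropLast := by
      rw [heappop]; simp [hemp]
    rw [hstep]
    intro c hcl h1
    rw [List.isEmpty_iff] at hemp
    rw [hemp] at hcl
    simp at hcl
  · simp only [Bool.not_eq_true] at hemp
    rw [heappop_eq_of_nonempty _ hemp]
    have hrlen : 0 < heap.dropLast.length := by
      cases hre : heap.dropLast with
      | nil => rw [hre] at hemp; simp at hemp
      | cons a b => simp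
    have hld : heap.dropLast.length = heap.length - 1 := List.length_dropLast
    apply siftup_valid (heap.dropLast.set 0 (heap.getLastD (0, 0))).length 0
    · rfl
    · simpa using hrlen
    · intro c hcl h1 hcne hcpar
      simp only [List.length_set] at hcl
      rw [getD_set_ne _ _ _ _ (by omega), getD_set_ne _ _ _ _ (by omega)]
      have hcd : c < heap.length := by omega
      have e1 : heap.dropLast.getD c (0, 0) = heap.getD c (0, 0) := by
        rw [List.getD_eq_getElem _ _ hcl, List.getD_eq_getElem _ _ hcd, List.getElem_dropLast]
      have hpd : (c - 1) / 2 < heap.dropLast.length := by omega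
      have e2 : heap.dropLast.getD ((c - 1) / 2) (0, 0) = heap.getD ((c - 1) / 2) (0, 0) := by
        rw [List.getD_eq_getElem _ _ hpd, List.getD_eq_getElem _ _ (by omega),
          List.getElem_dropLast]
      rw [e1, e2]
      exact h c hcd h1
    · intro h10
      omega

theorem root_min (h : List (Int × Int)) (hv : HeapInv h) :
    ∀ i, i < h.length → pvLt (h.getD i (0, 0)) (h.getD 0 (0, 0)) = false := by
  intro i
  induction i using Nat.strong_induction_on with
  | _ i ih =>
  intro hi
  by_cases h0 : i = 0
  · subst h0; exact pvLt_irrefl _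
  · have h1 : 1 ≤ i := by omega
    have hp := hv i hi h1
    have hip : (i - 1) / 2 < i := by omega
    have hr := ih _ hip (lt_trans hip hi)
    exact pvLe_trans hr hp

-- B's linear scan returns the minimum
theorem foldlMin_mem (t : List (Int × Int)) (b : Int × Int) :
    t.foldl (fun b c => if pvLt c b then c else b) b = b ∨
    t.foldl (fun b c => if pvLt c b then c else b) b ∈ t := by
  induction t generalizing b with
  | nil => left; rfl
  | cons x r ih =>
    simp only [List.foldl_cons]
    rcases ih (if pvLt x b then x else b) with hh | hh
    · by_cases hx : pvLt x b = true
      · rw [if_pos hx] at hh ⊢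
        right
        rw [hh]
        exact List.mem_cons_self ..
      · rw [if_neg hx] at hh ⊢
        left
        exact hh
    · right
      exact List.mem_cons_of_mem _ hh

theorem foldlMin_le_init (t : List (Int × Int)) (b : Int × Int) :
    pvLt b (t.foldl (fun b c => if pvLt c b then c else b) b) = false := by
  induction t generalizing b with
  | nil => exact pvLt_irrefl _
  | cons x r ih =>
    simp only [List.foldl_cons]
    have hinit := ih (if pvLt x b then x else b)
    have hb : pvLt b (if pvLt x b then x else b) = false := by
      by_cases hx : pvLt x b = true
      · rw [if_pos hx]; exact pvLt_asymm hx
      · rw [if_neg hx]; exact pvLt_irrefl _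
    exact pvLe_trans hinit hb

theorem foldlMin_le_mem (t : List (Int × Int)) : ∀ (b x : Int × Int), x ∈ t →
    pvLt x (t.foldl (fun b c => if pvLt c b then c else b) b) = false := by
  induction t with
  | nil => intro b x hx; simp at hx
  | cons y r ih =>
    intro b x hx
    simp only [List.foldl_cons]
    rcases List.mem_cons.mp hx with hh | hh
    · subst hh
      refine pvLe_trans (foldlMin_le_init r _) ?_
      by_cases hxb : pvLt x b = true
      · rw [if_pos hxb]; exact pvLt_irrefl _
      · rw [if_neg hxb]; simpa using hxb
    · exact ih _ x hh

theorem bestOf_mem (avail : List (Int × Int)) (h : avail ≠ []) : bestOf avail ∈ avail := by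
  cases avail with
  | nil => exact absurd rfl h
  | cons a0 t =>
    have he : bestOf (a0 :: t) = t.foldl (fun b c => if pvLt c b then c else b) a0 := rfl
    rw [he]
    rcases foldlMin_mem t a0 with hh | hh
    · rw [hh]; exact List.mem_cons_self ..
    · exact List.mem_cons_of_mem _ hh

theorem bestOf_min (avail : List (Int × Int)) (h : avail ≠ []) :
    ∀ x ∈ avail, pvLt x (bestOf avail) = false := by
  cases avail with
  | nil => exact absurd rfl h
  | cons a0 t =>
    intro x hx
    have he : bestOf (a0 :: t) = t.foldl (fun b c => if pvLt c b then c else b) a0 := rfl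
    rw [he]
    rcases List.mem_cons.mp hx with hh | hh
    · subst hh; exact foldlMin_le_init t x
    · exact foldlMin_le_mem t a0 x hh

-- popped values agree and the remainders stay permuted
theorem pop_eq_best (heap avail : List (Int × Int)) (hv : HeapInv heap) (hp : heap.Perm avail)
    (h : heap ≠ []) :
    (heappop heap).1 = bestOf avail ∧
    ((heappop heap).2).Perm ((PySem.List.remove? avail (bestOf avail)).getD []) := by
  have havail : avail ≠ [] := by
    intro hnil
    rw [hnil] at hp
    exact h hp.eq_nil
  have hfst := heappop_fst heap h
  have hroot_mem : heap.getD 0 (0, 0) ∈ heap := by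
    cases heap with
    | nil => exact absurd rfl h
    | cons a t => simp
  have hv_min : ∀ x ∈ heap, pvLt x (heap.getD 0 (0, 0)) = false := by
    intro x hx
    obtain ⟨i, hi, hix⟩ := List.mem_iff_getElem.mp hx
    have hrm := root_min heap hv i hi
    rw [List.getD_eq_getElem _ _ hi, hix] at hrm
    exact hrm
  have hb_mem := bestOf_mem avail havail
  have hb_min := bestOf_min avail havail
  have heq : heap.getD 0 (0, 0) = bestOf avail := by
    have h1 := hb_min _ (hp.subset hroot_mem)
    have h2 := hv_min _ (hp.symm.subset hb_mem)
    exact pvLt_antisymm h1 h2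
  refine ⟨by rw [hfst, heq], ?_⟩
  have hrm := PySem.List.remove?_eq_some_erase _ _ hb_mem
  rw [hrm]
  simp only [Option.getD_some]
  have hpop := heappop_perm heap h
  rw [hfst, heq] at hpop
  have hchain : (bestOf avail :: (heappop heap).2).Perm
      (bestOf avail :: avail.erase (bestOf avail)) :=
    hpop.trans (hp.trans (List.perm_cons_erase hb_mem))
  exact hchain.cons_inv

-- the inner loops correspond
theorem push_fill (n : Nat) (order : List (Int × Int × Int)) (p : Nat) (h : Int)
    (heap avail : List (Int × Int)) (hn : order.length - p = n) (hp : p ≤ order.length)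
    (hperm : heap.Perm avail) (hv : HeapInv heap) :
    (pushItems h (order.drop p) heap).1 = order.drop (bFill h order p avail).1 ∧
    ((pushItems h (order.drop p) heap).2).Perm (bFill h order p avail).2 ∧
    HeapInv (pushItems h (order.drop p) heap).2 ∧
    (bFill h order p avail).1 ≤ order.length := by
  induction n generalizing p heap avail with
  | zero =>
    have hpe : p = order.length := by omega
    have hdrop : order.drop p = [] := by rw [hpe]; simp
    rw [bFill, dif_neg (by omega)]
    refine ⟨?_, ?_, ?_, ?_⟩
    · simp [hdrop, pushItems]
    · simpa [hdrop, pushItems] using hperm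
    · simpa [hdrop, pushItems] using hv
    · exact hp
  | succ m ih =>
    have hplen : p < order.length := by omega
    have hdrop := List.drop_eq_getElem_cons hplen
    have hgd : order.getD p (0, 0, 0) = order[p] := List.getD_eq_getElem _ _ hplen
    rw [bFill, hdrop]
    by_cases hcond : h - (order[p]).1 < 100
    · rw [dif_neg (by rw [hgd]; omega)]
      simp only [pushItems, if_pos hcond]
      exact ⟨hdrop.symm, hperm, hv, by omega⟩
    · rw [dif_pos (by rw [hgd]; exact ⟨hplen, by omega⟩)]
      simp only [pushItems, if_neg hcond]
      rw [hgd]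
      apply ih (p + 1) _ _ (by omega) (by omega)
      · refine (heappush_perm heap _).trans ?_
        refine (hperm.cons _).trans ?_
        exact (List.perm_append_singleton _ _).symm
      · exact heappush_valid heap _ hv

theorem loop_eq (healths : List Int) (order : List (Int × Int × Int)) (p : Nat)
    (heap avail : List (Int × Int)) (answer : List Int) (hp : p ≤ order.length)
    (hperm : heap.Perm avail) (hv : HeapInv heap) :
    aLoop healths (order.drop p) heap answer = bLoop healths order p avail answer := by
  induction healths generalizing p heap avail answer with
  | nil => rfl
  | cons h hs ih =>
    simp only [aLoop, bLoop]
    obtain ⟨e1, e2, e3, e4⟩ :=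
      push_fill (order.length - p) order p h heap avail rfl hp hperm hv
    have hEmpty : (pushItems h (order.drop p) heap).2.isEmpty =
        (bFill h order p avail).2.isEmpty := by
      have hle := e2.length_eq
      cases h1 : (pushItems h (order.drop p) heap).2 <;>
        cases h2 : (bFill h order p avail).2 <;> rw [h1, h2] at hle <;> simp_all
    rw [e1, hEmpty]
    by_cases he : (bFill h order p avail).2.isEmpty = true
    · rw [if_pos he]
      rw [if_pos he]
      exact ih _ _ _ _ e4 e2 e3
    · rw [if_neg he]
      rw [if_neg he]
      have hne : (pushItems h (order.drop p) heap).2 ≠ [] := by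
        intro hnil
        rw [hnil] at hEmpty
        exact he (by simpa using hEmpty.symm)
      obtain ⟨q1, q2⟩ := pop_eq_best _ _ e3 e2 hne
      rw [q1]
      exact ih _ _ _ _ e4 q2 (heappop_valid _ e3)

-- ===== VERDICT (by name: the statement is the Claim_ definition above) =====
theorem solution_spec : Claim_equal_solution := by
  intro healths items _ _
  unfold Spec_solution solution solution_alt
  rw [show pvOrder items = (pvOrder items).drop 0 from rfl]
  rw [loop_eq _ _ 0 [] [] [] (by omega) (List.Perm.refl _) (by intro c hc h1; simp at hc)]
  rfl
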